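-- pv_equiv track=rewrite | github.com/kgalappatti-aegis/AEGIS | misp/normalizer.py | extract_tlp
-- ===== SOURCE A (Python) =====
-- from typing import Any
--
-- _TLP_ORDER = {"tlp:red": 4, "tlp:amber": 3, "tlp:green": 2, "tlp:white": 1}
--
-- def extract_tlp(tags: list[dict[str, Any]]) -> str:
--     """
--     Derive TLP classification from MISP tags.
--
--     Returns the most restrictive TLP found, defaulting to ``"tlp:green"``.
--     """
--     best: str = "tlp:green"
--     best_rank: int = _TLP_ORDER.get(best, 2)
--     for tag in tags:
--         tag_name = tag.get("name", "").lower().strip()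
--         rank = _TLP_ORDER.get(tag_name, 0)
--         if rank > best_rank:
--             best = tag_name
--             best_rank = rank
--     return best
-- ===== SOURCE B (Python) =====
-- def extract_tlp(tags):
--     """Derive TLP classification from MISP tags: index the normalized names once,
--     then probe in descending restrictiveness (only red/amber beat the green default)."""
--     names = {tag.get("name", "").lower().strip() for tag in tags}
--     if "tlp:red" in names:
--         return "tlp:red"
--     if "tlp:amber" in names:
--         return "tlp:amber"
--     return "tlp:green"
-- ===== Notes on version B (the rewrite author's own statement) =====
-- stated objective: alternative
-- what changed: Replaces the running-max scan over a rank table with a one-shot set of normalized names probed in descending priority (red, then amber, else green), exploiting that only red/amber exceed the green baseline.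
import Mathlib
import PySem

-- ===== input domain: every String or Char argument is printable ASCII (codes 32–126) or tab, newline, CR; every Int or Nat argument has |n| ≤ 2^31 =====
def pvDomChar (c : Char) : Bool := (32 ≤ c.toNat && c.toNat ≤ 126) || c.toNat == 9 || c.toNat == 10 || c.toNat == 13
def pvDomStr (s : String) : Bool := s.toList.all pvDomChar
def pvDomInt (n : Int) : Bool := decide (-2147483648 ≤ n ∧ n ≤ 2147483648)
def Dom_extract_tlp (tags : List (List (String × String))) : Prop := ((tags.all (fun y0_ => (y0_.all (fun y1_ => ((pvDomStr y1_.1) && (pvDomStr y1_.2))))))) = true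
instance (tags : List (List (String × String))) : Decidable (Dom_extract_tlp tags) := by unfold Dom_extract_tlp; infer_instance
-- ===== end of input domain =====

-- B replaces A's running-max scan with a set of normalized names probed in descending priority; same cost, different control flow.

-- ===== PORT A =====
-- tag.get("name", "").lower().strip()  (assoc-list lookup = first match)
def pvNorm (tag : List (String × String)) : String :=
  PySem.Str.strip (PySem.Str.lower (((tag.find? (fun p => p.1 == "name")).map (·.2)).getD ""))

-- _TLP_ORDER as a PySem.Dict literal
def pvTlpOrder : PySem.Dict String Int :=
  PySem.Dict.ofList [("tlp:red", 4), ("tlp:amber", 3), ("tlp:green", 2), ("tlp:white", 1)]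

def extract_tlp (tags : List (List (String × String))) : String :=
  (tags.foldl (fun (st : String × Int) tag =>
      let tag_name := pvNorm tag
      let rank := pvTlpOrder.getD tag_name 0
      if rank > st.2 then (tag_name, rank) else st)
    ("tlp:green", pvTlpOrder.getD "tlp:green" 2)).1

-- ===== PORT B =====
def extract_tlp_alt (tags : List (List (String × String))) : String :=
  let names : PySem.Set String := PySem.Set.ofList (tags.map pvNorm)
  if PySem.Set.contains names "tlp:red" then "tlp:red"
  else if PySem.Set.contains names "tlp:amber" then "tlp:amber"
  else "tlp:green"

-- ===== PRECONDITION & SPEC =====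
def Spec_extract_tlp (tags : List (List (String × String))) (out : String) : Prop := out = extract_tlp_alt tags
instance (tags : List (List (String × String))) (out : String) : Decidable (Spec_extract_tlp tags out) := by unfold Spec_extract_tlp; infer_instance

-- ===== CLAIM (what is proved, stated in full; the proofs are below) =====
def Claim_equal_extract_tlp : Prop := ∀ (tags : List (List (String × String))), Dom_extract_tlp tags → Spec_extract_tlp tags (extract_tlp tags)

-- ===== LEMMAS AND PROOFS =====

-- A's loop body, named for the lemmas
def pvStep (st : String × Int) (tag : List (String × String)) : String × Int :=
  let tag_name := pvNorm tag
  let rank := pvTlpOrder.getD tag_name 0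
  if rank > st.2 then (tag_name, rank) else st

theorem pvRank_char (s : String) :
    pvTlpOrder.getD s 0 =
      if s = "tlp:red" then 4 else if s = "tlp:amber" then 3
      else if s = "tlp:green" then 2 else if s = "tlp:white" then 1 else 0 := by
  simp only [pvTlpOrder, PySem.Dict.ofList, PySem.Dict.update, List.foldl_cons, List.foldl_nil,
    PySem.Dict.getD_insert, PySem.Dict.getD_empty]
  split_ifs <;> simp_all

theorem pvRank_le (s : String) : pvTlpOrder.getD s 0 ≤ 4 := by
  rw [pvRank_char]; split_ifs <;> norm_num

theorem fold_red (tags : List (List (String × String))) :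
    tags.foldl pvStep ("tlp:red", 4) = ("tlp:red", 4) := by
  induction tags with
  | nil => rfl
  | cons t rest ih =>
    have h : pvStep ("tlp:red", 4) t = ("tlp:red", 4) := by
      simp only [pvStep]
      have := pvRank_le (pvNorm t)
      split_ifs with h <;> [omega; rfl]
    simp [List.foldl_cons, h, ih]

theorem fold_amber (tags : List (List (String × String))) :
    tags.foldl pvStep ("tlp:amber", 3) =
      if "tlp:red" ∈ tags.map pvNorm then ("tlp:red", 4) else ("tlp:amber", 3) := by
  induction tags with
  | nil => simp
  | cons t rest ih =>
    simp only [List.foldl_cons, List.map_cons, List.mem_cons]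
    by_cases hr : pvNorm t = "tlp:red"
    · have h : pvStep ("tlp:amber", 3) t = ("tlp:red", 4) := by
        simp [pvStep, hr, pvRank_char]
      simp [h, fold_red, hr]
    · have h : pvStep ("tlp:amber", 3) t = ("tlp:amber", 3) := by
        simp only [pvStep, pvRank_char]
        split_ifs with h1 h2 <;> simp_all
      rw [h, ih]
      have hne : ¬("tlp:red" = pvNorm t) := fun e => hr e.symm
      simp [hne]
  
theorem fold_green (tags : List (List (String × String))) :
    tags.foldl pvStep ("tlp:green", 2) =
      if "tlp:red" ∈ tags.map pvNorm then ("tlp:red", 4)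
      else if "tlp:amber" ∈ tags.map pvNorm then ("tlp:amber", 3)
      else ("tlp:green", 2) := by
  induction tags with
  | nil => simp
  | cons t rest ih =>
    simp only [List.foldl_cons, List.map_cons, List.mem_cons]
    by_cases hr : pvNorm t = "tlp:red"
    · have h : pvStep ("tlp:green", 2) t = ("tlp:red", 4) := by
        simp [pvStep, hr, pvRank_char]
      simp [h, fold_red, hr]
    · by_cases ha : pvNorm t = "tlp:amber"
      · have h : pvStep ("tlp:green", 2) t = ("tlp:amber", 3) := by
          simp [pvStep, ha, pvRank_char]
        rw [h, fold_amber]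
        have hne : ¬("tlp:red" = pvNorm t) := fun e => hr e.symm
        simp [hne, ha]
      · have h : pvStep ("tlp:green", 2) t = ("tlp:green", 2) := by
          simp only [pvStep, pvRank_char]
          split_ifs with h1 h2 <;> simp_all
        rw [h, ih]
        have hne : ¬("tlp:red" = pvNorm t) := fun e => hr e.symm
        have hne2 : ¬("tlp:amber" = pvNorm t) := fun e => ha e.symm
        simp [hne, hne2]

-- ===== VERDICT (by name: the statement is the Claim_ definition above) =====
theorem extract_tlp_spec : Claim_equal_extract_tlp := by
  intro tags _
  unfold Spec_extract_tlp extract_tlp extract_tlp_alt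
  have h2 : pvTlpOrder.getD "tlp:green" 2 = (2 : Int) := by decide
  show (tags.foldl pvStep ("tlp:green", pvTlpOrder.getD "tlp:green" 2)).1 = _
  rw [h2, fold_green]
  by_cases hr : "tlp:red" ∈ tags.map pvNorm <;>
    by_cases ha : "tlp:amber" ∈ tags.map pvNorm <;>
      simp [hr, ha, PySem.Set.mem_ofList]
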